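-- pv_equiv track=rewrite | github.com/yyang412/antibody-developability-rf | feature_engineering/RF_utils.py | has_aromatic_cluster
-- ===== SOURCE A (Python) =====
-- AROMATIC_AA   = ['F', 'Y', 'W']
--
-- def has_aromatic_cluster(seq: str, min_run: int = 2) -> int:
--     """
--     Check whether the sequence has at least 'min_run' consecutive aromatic residues (F/Y/W).
--     Returns:
--       1 if an aromatic cluster exists (aggregation hotspot),
--       0 otherwise.
--     """
--     if not seq:
--         return 0
--
--     run = 0
--     for aa in seq:
--         if aa in AROMATIC_AA:
--             run += 1
--             if run >= min_run:
--                 return 1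
--         else:
--             run = 0
--     return 0
-- ===== SOURCE B (Python) =====
-- from itertools import groupby
--
-- AROMATIC_AA = ['F', 'Y', 'W']
--
-- def has_aromatic_cluster(seq: str, min_run: int = 2) -> int:
--     """Build maximal same-key runs with groupby, then test aromatic run lengths."""
--     if not seq:
--         return 0
--     return 1 if any(
--         is_arom and sum(1 for _ in group) >= min_run
--         for is_arom, group in groupby(seq, key=lambda aa: aa in AROMATIC_AA)
--     ) else 0
-- ===== Notes on version B (the rewrite author's own statement) =====
-- stated objective: idiomatic
-- what changed: Replaced the streaming running-counter with early exit by an itertools.groupby decomposition: build maximal aromatic/non-aromatic runs, then return 1 iff some aromatic run has length >= min_run.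
import Mathlib
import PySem

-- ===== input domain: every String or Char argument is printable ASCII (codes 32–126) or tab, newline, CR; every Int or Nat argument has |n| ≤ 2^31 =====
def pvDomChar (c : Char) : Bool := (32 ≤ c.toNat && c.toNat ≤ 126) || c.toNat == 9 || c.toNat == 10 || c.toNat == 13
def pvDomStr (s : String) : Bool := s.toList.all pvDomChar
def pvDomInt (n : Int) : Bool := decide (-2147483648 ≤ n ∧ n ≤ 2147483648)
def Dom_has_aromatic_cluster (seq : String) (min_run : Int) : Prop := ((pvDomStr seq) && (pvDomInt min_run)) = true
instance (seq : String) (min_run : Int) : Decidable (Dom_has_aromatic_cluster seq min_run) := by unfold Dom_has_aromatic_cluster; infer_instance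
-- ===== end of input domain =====

-- B replaces A's streaming counter with a groupby decomposition (build maximal runs, then
-- test aromatic run lengths); objective: idiomatic, same cost.

-- ===== PORT A =====
-- A's 'run' loop with early return 1; 0 when the loop finishes.
def hacLoop (min_run : Int) (run : Int) : List Char → Int
  | [] => 0
  | c :: rest =>
    if (['F', 'Y', 'W'] : List Char).contains c then
      if min_run ≤ run + 1 then 1 else hacLoop min_run (run + 1) rest
    else hacLoop min_run 0 rest

def has_aromatic_cluster (seq : String) (min_run : Int) : Int :=
  if seq.toList = [] then 0 else hacLoop min_run 0 seq.toList

-- ===== PORT B =====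
def isAromB (c : Char) : Bool := (['F', 'Y', 'W'] : List Char).contains c

-- itertools.groupby over the key (aa in AROMATIC_AA): list of (key, run length)
def hacGroups : List Char → List (Bool × Int)
  | [] => []
  | c :: cs =>
    (isAromB c, (1 : Int) + (cs.takeWhile (fun d => isAromB d == isAromB c)).length)
      :: hacGroups (cs.dropWhile (fun d => isAromB d == isAromB c))
termination_by l => l.length
decreasing_by
  exact Nat.lt_succ_of_le (List.length_dropWhile_le _ _)

def has_aromatic_cluster_alt (seq : String) (min_run : Int) : Int :=
  if seq.toList = [] then 0
  else if (hacGroups seq.toList).any (fun p => p.1 && decide (min_run ≤ p.2)) then 1 else 0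

-- ===== PRECONDITION & SPEC =====
def Spec_has_aromatic_cluster (seq : String) (min_run : Int) (out : Int) : Prop := out = has_aromatic_cluster_alt seq min_run
instance (seq : String) (min_run : Int) (out : Int) : Decidable (Spec_has_aromatic_cluster seq min_run out) := by unfold Spec_has_aromatic_cluster; infer_instance

-- ===== CLAIM (what is proved, stated in full; the proofs are below) =====
def Claim_equal_has_aromatic_cluster : Prop := ∀ (seq : String) (min_run : Int), Dom_has_aromatic_cluster seq min_run → Spec_has_aromatic_cluster seq min_run (has_aromatic_cluster seq min_run)

-- ===== LEMMAS AND PROOFS =====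

-- across a non-empty all-aromatic block the counter either reaches min_run (return 1)
-- or exits the block increased by the block length
theorem hacLoop_arom_block (min_run : Int) (block rest : List Char)
    (hne : block ≠ []) (hall : ∀ c ∈ block, isAromB c = true) (run : Int) :
    hacLoop min_run run (block ++ rest) =
      if min_run ≤ run + block.length then 1 else hacLoop min_run (run + block.length) rest := by
  induction block generalizing run with
  | nil => exact absurd rfl hne
  | cons c bs ih =>
    have hc : isAromB c = true := hall c (by simp)
    simp only [List.cons_append, hacLoop, isAromB] at hc ⊢
    rw [hc]
    simp only [if_true]
    by_cases h1 : min_run ≤ run + 1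
    · have : min_run ≤ run + ((c :: bs).length : Int) := by
        simp only [List.length_cons]; push_cast; omega
      rw [if_pos h1, if_pos this]
    · rw [if_neg h1]
      by_cases hbs : bs = []
      · subst hbs
        simp only [List.nil_append, List.length_cons, List.length_nil]
        rw [if_neg (by push_cast; omega)]
        norm_num
      · rw [ih hbs (fun d hd => hall d (by simp [hd])) (run + 1)]
        have : (run + 1) + (bs.length : Int) = run + ((c :: bs).length : Int) := by
          simp only [List.length_cons]; push_cast; omega
        rw [this]

-- across a non-empty all-non-aromatic block the counter is reset and nothing returns
theorem hacLoop_nonarom_block (min_run : Int) (block rest : List Char)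
    (hne : block ≠ []) (hall : ∀ c ∈ block, isAromB c = false) (run : Int) :
    hacLoop min_run run (block ++ rest) = hacLoop min_run 0 rest := by
  induction block generalizing run with
  | nil => exact absurd rfl hne
  | cons c bs ih =>
    have hc : isAromB c = false := hall c (by simp)
    simp only [List.cons_append, hacLoop, isAromB] at hc ⊢
    rw [hc]
    simp only [Bool.false_eq_true, if_false]
    by_cases hbs : bs = []
    · subst hbs; simp
    · exact ih hbs (fun d hd => hall d (by simp [hd])) 0

-- resetting the counter at a reset point (empty list or non-aromatic head) is irrelevant
theorem hacLoop_reset (min_run : Int) (l : List Char)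
    (h : ∀ d, ∀ ds, l = d :: ds → isAromB d = false) (run : Int) :
    hacLoop min_run run l = hacLoop min_run 0 l := by
  cases l with
  | nil => rfl
  | cons d ds =>
    have hd : isAromB d = false := h d ds rfl
    simp only [hacLoop, isAromB] at hd ⊢
    rw [hd]
    simp

-- head of dropWhile fails the predicate
theorem dropWhile_head_false {p : Char → Bool} (l : List Char) :
    ∀ d ds, l.dropWhile p = d :: ds → p d = false := by
  induction l with
  | nil => intro d ds h; simp [List.dropWhile] at h
  | cons c cs ih =>
    intro d ds h
    by_cases hc : p c = true
    · rw [List.dropWhile_cons_of_pos hc] at h; exact ih d ds h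
    · rw [List.dropWhile_cons_of_neg hc] at h
      cases h; exact eq_false_of_ne_true hc

-- main invariant: A's loop from counter 0 equals the groups-based test
theorem hacLoop_eq_groups (min_run : Int) (l : List Char) :
    hacLoop min_run 0 l =
      if (hacGroups l).any (fun p => p.1 && decide (min_run ≤ p.2)) then 1 else 0 := by
  induction hn : l.length using Nat.strong_induction_on generalizing l with
  | _ n ih =>
  cases l with
  | nil =>
    simp only [hacGroups]
    simp [hacLoop]
  | cons c cs =>
    subst hn
    have hsplit : c :: cs =
        (c :: cs.takeWhile (fun d => isAromB d == isAromB c)) ++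
          cs.dropWhile (fun d => isAromB d == isAromB c) := by
      simp [List.takeWhile_append_dropWhile]
    set tk := cs.takeWhile (fun d => isAromB d == isAromB c) with htk
    set dp := cs.dropWhile (fun d => isAromB d == isAromB c) with hdp
    have hdplt : dp.length < (c :: cs).length := by
      simp only [List.length_cons]
      exact Nat.lt_succ_of_le (List.length_dropWhile_le _ _)
    have hih := ih dp.length hdplt dp rfl
    have hgroups : hacGroups (c :: cs) =
        (isAromB c, (1 : Int) + (tk.length : Int)) :: hacGroups dp := by
      rw [hacGroups.eq_def]
    have hblockall : ∀ d ∈ c :: tk, isAromB d = isAromB c := by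
      intro d hd
      rcases List.mem_cons.mp hd with h | h
      · rw [h]
      · have := List.mem_takeWhile_imp (htk ▸ h)
        exact eq_of_beq this
    have hdpfalse : ∀ d ds, dp = d :: ds → isAromB d = !(isAromB c) := by
      intro d ds h
      have := dropWhile_head_false (p := fun d => isAromB d == isAromB c) cs d ds (hdp ▸ h)
      simp only [beq_eq_false_iff_ne, ne_eq] at this
      exact Bool.eq_not_iff.mpr this
    by_cases hk : isAromB c = true
    · -- aromatic block
      have h1 : hacLoop min_run 0 (c :: cs) =
          if min_run ≤ (0 : Int) + ((c :: tk).length : Int) then 1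
          else hacLoop min_run ((0 : Int) + ((c :: tk).length : Int)) dp := by
        conv_lhs => rw [hsplit]
        exact hacLoop_arom_block min_run (c :: tk) dp (List.cons_ne_nil _ _)
          (fun d hd => (hblockall d hd).trans hk) 0
      rw [h1, hgroups]
      simp only [List.any_cons, hk, Bool.true_and]
      have hlen : (0 : Int) + ((c :: tk).length : Int) = 1 + (tk.length : Int) := by
        simp only [List.length_cons]; push_cast; omega
      rw [hlen]
      by_cases hle : min_run ≤ 1 + (tk.length : Int)
      · simp [hle]
      · rw [if_neg hle]
        have hreset := hacLoop_reset min_run dp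
          (fun d ds h => by rw [hdpfalse d ds h, hk]; rfl) (1 + (tk.length : Int))
        rw [hreset, hih, decide_eq_false hle, Bool.false_or]
    · -- non-aromatic block
      have hkf : isAromB c = false := eq_false_of_ne_true hk
      have h1 : hacLoop min_run 0 (c :: cs) = hacLoop min_run 0 dp := by
        conv_lhs => rw [hsplit]
        exact hacLoop_nonarom_block min_run (c :: tk) dp (List.cons_ne_nil _ _)
          (fun d hd => (hblockall d hd).trans hkf) 0
      rw [h1, hih, hgroups]
      simp only [List.any_cons, hkf, Bool.false_and, Bool.false_or]

-- ===== VERDICT (by name: the statement is the Claim_ definition above) =====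
theorem has_aromatic_cluster_spec : Claim_equal_has_aromatic_cluster := by
  intro seq min_run _
  unfold Spec_has_aromatic_cluster has_aromatic_cluster has_aromatic_cluster_alt
  by_cases h : seq.toList = []
  · simp [h]
  · rw [if_neg h, if_neg h]
    exact hacLoop_eq_groups min_run seq.toList
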